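-- pv_equiv track=rewrite | github.com/tulioac/ExerciciosTST | unidade07/alocacao_horario/o.py | get_choque_horario
-- ===== SOURCE A (Python) =====
-- def achar_na_lista(lista, procurado):
--     for i in lista:
--         if i == procurado:
--             return True
--     return False
--
-- def get_choque_horario(disciplinas):
--     choques = []
--     for i in range(len(disciplinas)):
--         for j in range(i+1, len(disciplinas)):
--             if disciplinas[i][len(disciplinas[i])-1] == disciplinas[j][len(disciplinas[j])-1]:
--                 if not achar_na_lista(choques, disciplinas[i]):
--                     choques.append(disciplinas[i])
--                 if not achar_na_lista(choques, disciplinas[j]):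
--                     choques.append(disciplinas[j])
--
--     return choques
-- ===== SOURCE B (Python) =====
-- def get_choque_horario(disciplinas):
--     if len(disciplinas) < 2:
--         return []
--     groups = {}
--     for d in disciplinas:
--         groups.setdefault(d[-1], []).append(d)
--     choques = []
--     for members in groups.values():
--         if len(members) >= 2:
--             seen = []
--             for d in members:
--                 if d not in seen:
--                     seen.append(d)
--             choques += seen
--     return choques
-- ===== Notes on version B (the rewrite author's own statement) =====
-- stated objective: faster
-- what changed: Replaced the quadratic all-pairs comparison (with a linear scan of the output for every append) by a single pass grouping disciplines in a dict keyed on their last element, then emitting each group of size >= 2 in first-seen key order with a per-group value dedup.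
import Mathlib
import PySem

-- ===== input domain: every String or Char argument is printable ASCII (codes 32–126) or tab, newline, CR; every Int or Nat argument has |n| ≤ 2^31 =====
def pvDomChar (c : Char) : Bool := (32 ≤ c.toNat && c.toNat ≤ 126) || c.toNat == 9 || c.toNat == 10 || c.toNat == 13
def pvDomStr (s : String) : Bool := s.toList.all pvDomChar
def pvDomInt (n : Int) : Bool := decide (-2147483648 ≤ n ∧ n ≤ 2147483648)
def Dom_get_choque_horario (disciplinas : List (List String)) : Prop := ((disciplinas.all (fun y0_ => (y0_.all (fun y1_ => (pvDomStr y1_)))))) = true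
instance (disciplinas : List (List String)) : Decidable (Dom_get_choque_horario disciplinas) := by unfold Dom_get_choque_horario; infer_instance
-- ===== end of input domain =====

-- B replaces A's all-pairs scan by one grouping pass over a dict keyed on each
-- discipline's last element, then emits each group of size ≥ 2 (deduplicated by
-- value) in first-seen key order; faster by avoiding the pairwise comparison.

-- ===== PORT A =====
def achar_na_lista (lista : List (List String)) (procurado : List String) : Bool :=
  match lista with
  | [] => false
  | i :: rest => if i == procurado then true else achar_na_lista rest procurado

def get_choque_horario (disciplinas : List (List String)) : List (List String) :=
  (PySem.List.pyRange 0 (disciplinas.length : Int) 1).foldl (fun choques i =>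
    (PySem.List.pyRange (i + 1) (disciplinas.length : Int) 1).foldl (fun choques j =>
      let di := PySem.List.pyGetD disciplinas i []
      let dj := PySem.List.pyGetD disciplinas j []
      if PySem.List.pyGetD di ((di.length : Int) - 1) "" == PySem.List.pyGetD dj ((dj.length : Int) - 1) "" then
        let c1 := if achar_na_lista choques di then choques else choques ++ [di]
        if achar_na_lista c1 dj then c1 else c1 ++ [dj]
      else choques) choques) []

-- ===== PORT B =====
def get_choque_horario_alt (disciplinas : List (List String)) : List (List String) :=
  if disciplinas.length < 2 then [] else
  -- groups.setdefault(d[-1], []).append(d)  ==  groups[d[-1]] = groups.get(d[-1], []) + [d]  ==  Dict.modify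
  let groups : PySem.Dict String (List (List String)) :=
    disciplinas.foldl (fun g d => g.modify (PySem.List.pyGetD d (-1) "") [] (· ++ [d])) PySem.Dict.empty
  groups.values.foldl (fun choques members =>
    if 2 ≤ members.length then
      choques ++ members.foldl (fun seen d => if seen.contains d then seen else seen ++ [d]) []
    else choques) []

-- ===== PRECONDITION & SPEC =====
-- Pre_ excludes exactly the inputs on which Python A raises IndexError: two or
-- more disciplines with some discipline being the empty list (d[-1] raises; B raises there too).
def Pre_get_choque_horario (disciplinas : List (List String)) : Prop :=
  disciplinas.length < 2 ∨ ∀ d ∈ disciplinas, d ≠ []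
instance (disciplinas : List (List String)) : Decidable (Pre_get_choque_horario disciplinas) := by unfold Pre_get_choque_horario; infer_instance

def pvWitness_get_choque_horario : List (List String) :=
  [["seg", "10:00"], ["ter", "08:00"], ["qua", "10:00"]]

def Spec_get_choque_horario (disciplinas : List (List String)) (out : List (List String)) : Prop := out = get_choque_horario_alt disciplinas
instance (disciplinas : List (List String)) (out : List (List String)) : Decidable (Spec_get_choque_horario disciplinas out) := by unfold Spec_get_choque_horario; infer_instance

-- ===== CLAIM (what is proved, stated in full; the proofs are below) =====
def Claim_equal_get_choque_horario : Prop := ∀ (disciplinas : List (List String)), Dom_get_choque_horario disciplinas → Pre_get_choque_horario disciplinas → Spec_get_choque_horario disciplinas (get_choque_horario disciplinas)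

-- ===== LEMMAS AND PROOFS =====

-- the key both programs group/compare by: d[-1] (with "" standing for the excluded IndexError)
def keyf (d : List String) : String := PySem.List.pyGetD d (-1) ""

-- 'append d if its value is not yet present', folded over xs
def accAdd (acc : List (List String)) (xs : List (List String)) : List (List String) :=
  xs.foldl (fun seen d => if seen.contains d then seen else seen ++ [d]) acc

-- the group of key k inside l
def grp (l : List (List String)) (k : String) : List (List String) :=
  l.filter (fun e => keyf e == k)

-- canonical result after the prefix 'pre' of the full list 'l' has been processed
def F (l pre : List (List String)) : List (List String) :=
  (PySem.List.dedup (pre.map keyf)).flatMap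
    (fun k => if 2 ≤ (grp l k).length then accAdd [] (grp l k) else [])

-- A's inner loop (i fixed, j over the tail s), restated structurally
def innerL (acc : List (List String)) (d : List String) (s : List (List String)) : List (List String) :=
  s.foldl (fun ch e =>
    if keyf d == keyf e then
      let c1 := if achar_na_lista ch d then ch else ch ++ [d]
      if achar_na_lista c1 e then c1 else c1 ++ [e]
    else ch) acc

-- A's outer loop, restated structurally over the tails of l
def goA (acc : List (List String)) : List (List String) → List (List String)
  | [] => acc
  | d :: s => goA (innerL acc d s) s

theorem keyf_eq_last (d : List String) :
    PySem.List.pyGetD d ((d.length : Int) - 1) "" = keyf d := by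
  cases d with
  | nil => rfl
  | cons x xs =>
    simp [keyf, PySem.List.pyGetD, PySem.List.pyGet?, PySem.List.pyIdx?]

theorem achar_eq_contains (l : List (List String)) (p : List String) :
    achar_na_lista l p = l.contains p := by
  induction l with
  | nil => rfl
  | cons x xs ih =>
    by_cases h : x = p
    · simp [achar_na_lista, h]
    · simp [achar_na_lista, h, ih]
      intro hpx
      exact absurd hpx.symm h

theorem accAdd_cons (acc : List (List String)) (x : List String) (xs : List (List String)) :
    accAdd acc (x :: xs) = accAdd (if x ∈ acc then acc else acc ++ [x]) xs := by
  by_cases h : x ∈ acc <;> simp [accAdd, h]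

theorem mem_accAdd (acc xs : List (List String)) (v : List String) :
    v ∈ accAdd acc xs ↔ v ∈ acc ∨ v ∈ xs := by
  induction xs generalizing acc with
  | nil => simp [accAdd]
  | cons x t ih =>
    rw [accAdd_cons, ih]
    by_cases h : x ∈ acc
    · simp only [if_pos h, List.mem_cons]
      constructor
      · tauto
      · rintro (hv | rfl | hv) <;> tauto
    · simp only [if_neg h, List.mem_append, List.mem_cons]
      tauto

theorem accAdd_cons_of_mem (acc : List (List String)) (x : List String) (xs : List (List String))
    (h : x ∈ acc) : accAdd acc (x :: xs) = accAdd acc xs := by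
  rw [accAdd_cons, if_pos h]

theorem accAdd_append (acc xs ys : List (List String)) :
    accAdd acc (xs ++ ys) = accAdd (accAdd acc xs) ys := by
  simp [accAdd, List.foldl_append]

theorem accAdd_of_subset (acc xs : List (List String)) (h : ∀ x ∈ xs, x ∈ acc) :
    accAdd acc xs = acc := by
  induction xs with
  | nil => rfl
  | cons x t ih =>
    have hx : x ∈ acc := h x (by simp)
    rw [accAdd_cons_of_mem _ _ _ hx]
    exact ih (fun y hy => h y (by simp [hy]))

theorem accAdd_disjoint_aux (acc : List (List String)) (xs : List (List String))
    (h : ∀ x ∈ xs, x ∉ acc) : ∀ b, accAdd (acc ++ b) xs = acc ++ accAdd b xs := by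
  induction xs with
  | nil => intro b; rfl
  | cons x t ih =>
    intro b
    have hx : x ∉ acc := h x (by simp)
    have ht : ∀ y ∈ t, y ∉ acc := fun y hy => h y (by simp [hy])
    by_cases hb : x ∈ b
    · rw [accAdd_cons_of_mem _ _ _ (by simp [hb]), accAdd_cons_of_mem _ _ _ hb, ih ht]
    · have h1 : ¬ (acc ++ b).contains x := by simp_all
      have h2 : ¬ b.contains x := by simp_all
      simp only [accAdd, List.foldl_cons, if_neg h1, if_neg h2]
      have := ih ht (b ++ [x])
      simpa [accAdd, List.append_assoc] using this

theorem accAdd_disjoint (acc xs : List (List String)) (h : ∀ x ∈ xs, x ∉ acc) :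
    accAdd acc xs = acc ++ accAdd [] xs := by
  have := accAdd_disjoint_aux acc xs h []
  simpa using this

-- every value in F l pre lies in the group of some key of pre
theorem mem_F (l pre : List (List String)) (x : List String) (hx : x ∈ F l pre) :
    keyf x ∈ pre.map keyf := by
  simp only [F, List.mem_flatMap] at hx
  obtain ⟨k, hk, hxk⟩ := hx
  by_cases hbig : 2 ≤ (grp l k).length
  · rw [if_pos hbig] at hxk
    have hxg : x ∈ grp l k := by
      rcases (mem_accAdd [] _ x).mp hxk with h | h
      · simp at h
      · exact h
    have hkey : keyf x = k := by
      have := (List.mem_filter.mp hxg).2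
      simpa using this
    simp only [PySem.List.mem_dedup] at hk
    rw [hkey]
    exact hk
  · rw [if_neg hbig] at hxk
    simp at hxk

-- the group of a key of pre is entirely present in F l pre (when big)
theorem grp_subset_F (l pre : List (List String)) (k : String)
    (hk : k ∈ pre.map keyf) (hbig : 2 ≤ (grp l k).length) :
    ∀ x ∈ grp l k, x ∈ F l pre := by
  intro x hx
  simp only [F, List.mem_flatMap]
  exact ⟨k, by simpa [PySem.List.mem_dedup] using hk,
    by rw [if_pos hbig]; exact (mem_accAdd [] _ x).mpr (Or.inr hx)⟩

-- one matching step of the inner loop is accAdd of [d, e]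
theorem add2_eq (ch : List (List String)) (d e : List String) :
    (let c1 := if achar_na_lista ch d then ch else ch ++ [d]
     if achar_na_lista c1 e then c1 else c1 ++ [e]) = accAdd ch [d, e] := by
  simp only [achar_eq_contains, accAdd, List.foldl_cons, List.foldl_nil]

-- the inner loop restricted to the matching elements
theorem foldGrp_eq (d : List String) (m : List (List String)) (hm : m ≠ []) :
    ∀ acc, m.foldl (fun ch e =>
        let c1 := if achar_na_lista ch d then ch else ch ++ [d]
        if achar_na_lista c1 e then c1 else c1 ++ [e]) acc = accAdd acc (d :: m) := by
  induction m with
  | nil => exact absurd rfl hm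
  | cons e m' ih =>
    intro acc
    rw [List.foldl_cons, add2_eq]
    by_cases hm' : m' = []
    · subst hm'
      simp only [List.foldl_nil]
    · rw [ih hm' (accAdd acc [d, e])]
      have h1 : accAdd (accAdd acc [d, e]) (d :: m') = accAdd acc ([d, e] ++ d :: m') := by
        rw [accAdd_append]
      rw [h1, show [d, e] ++ d :: m' = [d, e] ++ [d] ++ m' from by simp,
          accAdd_append, accAdd_append,
          accAdd_of_subset (accAdd acc [d, e]) [d]
            (by intro x hx; simp at hx; subst hx; exact (mem_accAdd _ _ _).mpr (Or.inr (by simp))),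
          ← accAdd_append]
      rfl

-- inner loop characterisation
theorem innerL_eq (acc : List (List String)) (d : List String) (s : List (List String)) :
    innerL acc d s =
      if (s.filter (fun e => keyf d == keyf e)) = [] then acc
      else accAdd acc (d :: s.filter (fun e => keyf d == keyf e)) := by
  unfold innerL
  rw [PySem.List.foldl_if_eq_foldl_filter]
  by_cases h : s.filter (fun e => keyf d == keyf e) = []
  · rw [if_pos h, h, List.foldl_nil]
  · rw [if_neg h, foldGrp_eq d _ h acc]

-- dedup of an appended singleton
theorem dedup_append_singleton (xs : List String) (y : String) :
    PySem.List.dedup (xs ++ [y]) =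
      PySem.List.dedup xs ++ (if y ∈ xs then [] else [y]) := by
  rw [show PySem.List.dedup (xs ++ [y]) = PySem.Set.ofList (xs ++ [y]) from by simp,
      show PySem.List.dedup xs = PySem.Set.ofList xs from by simp,
      PySem.Set.ofList_append_singleton]
  by_cases h : y ∈ xs
  · rw [PySem.Set.add_of_mem (by rwa [PySem.Set.mem_ofList]), if_pos h, List.append_nil]
  · rw [PySem.Set.add_of_not_mem (by rwa [PySem.Set.mem_ofList]), if_neg h]

theorem filter_comm (d : List String) (s : List (List String)) :
    s.filter (fun e => keyf d == keyf e) = grp s (keyf d) := by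
  unfold grp
  apply List.filter_congr
  intro e _
  simp [eq_comm]

theorem grp_pre_eq_nil (pre : List (List String)) (k : String) (hk : k ∉ pre.map keyf) :
    grp pre k = [] := by
  rw [grp, List.filter_eq_nil_iff]
  intro e he hkeq
  exact hk (List.mem_map.mpr ⟨e, he, by simpa using hkeq⟩)

theorem grp_decomp (pre : List (List String)) (d : List String) (s : List (List String)) :
    grp (pre ++ d :: s) (keyf d) = grp pre (keyf d) ++ d :: grp s (keyf d) := by
  simp [grp, List.filter_append]

theorem F_append_singleton (l pre : List (List String)) (d : List String) :
    F l (pre ++ [d]) = F l pre ++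
      (if keyf d ∈ pre.map keyf then []
       else if 2 ≤ (grp l (keyf d)).length then accAdd [] (grp l (keyf d)) else []) := by
  unfold F
  rw [List.map_append, List.map_singleton, dedup_append_singleton, List.flatMap_append]
  by_cases h : keyf d ∈ pre.map keyf
  · rw [if_pos h, if_pos h]
    simp
  · rw [if_neg h, if_neg h]
    simp

theorem innerStep (l pre : List (List String)) (d : List String) (s : List (List String))
    (hl : l = pre ++ d :: s) : innerL (F l pre) d s = F l (pre ++ [d]) := by
  rw [innerL_eq, F_append_singleton, filter_comm]
  by_cases hk : keyf d ∈ pre.map keyf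
  · rw [if_pos hk, List.append_nil]
    obtain ⟨p, hp, hpk⟩ := List.mem_map.mp hk
    have hpre : grp pre (keyf d) ≠ [] := by
      intro hnil
      have : p ∈ grp pre (keyf d) := by
        rw [grp, List.mem_filter]
        exact ⟨hp, by simp [hpk]⟩
      simp [hnil] at this
    have hgl : grp l (keyf d) = grp pre (keyf d) ++ d :: grp s (keyf d) := by
      rw [hl, grp_decomp]
    have hbig : 2 ≤ (grp l (keyf d)).length := by
      rw [hgl]
      have := List.length_pos_iff.mpr hpre
      simp
      omega
    have hsub : ∀ x ∈ d :: grp s (keyf d), x ∈ F l pre := by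
      intro x hx
      apply grp_subset_F l pre (keyf d) hk hbig
      rw [hgl]
      exact List.mem_append_right _ hx
    split_ifs with hf
    · rfl
    · exact accAdd_of_subset _ _ hsub
  · rw [if_neg hk]
    have hpre0 : grp pre (keyf d) = [] := grp_pre_eq_nil pre (keyf d) hk
    have hgl : grp l (keyf d) = d :: grp s (keyf d) := by
      rw [hl, grp_decomp, hpre0, List.nil_append]
    by_cases hf : grp s (keyf d) = []
    · rw [if_pos hf]
      have : ¬ 2 ≤ (grp l (keyf d)).length := by
        rw [hgl, hf]
        simp
      rw [if_neg this, List.append_nil]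
    · rw [if_neg hf]
      have hbig : 2 ≤ (grp l (keyf d)).length := by
        rw [hgl]
        have := List.length_pos_iff.mpr hf
        simp
        omega
      rw [if_pos hbig, hgl]
      apply accAdd_disjoint
      intro x hx hmem
      have hkey : keyf x = keyf d := by
        rcases List.mem_cons.mp hx with rfl | hx'
        · rfl
        · simpa [grp] using (List.mem_filter.mp hx').2
      have := mem_F l pre x hmem
      rw [hkey] at this
      exact hk this

theorem goA_invariant (l : List (List String)) :
    ∀ (s pre : List (List String)), l = pre ++ s → goA (F l pre) s = F l (pre ++ s) := by
  intro s
  induction s with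
  | nil => intro pre h; simp [goA]
  | cons d s' ih =>
    intro pre hl
    show goA (innerL (F l pre) d s') s' = _
    rw [innerStep l pre d s' hl]
    have := ih (pre ++ [d]) (by rw [hl]; simp)
    rw [this]
    simp

-- A's port equals the structural restatement over tails
theorem A_eq_goA (l : List (List String)) : get_choque_horario l = goA [] l := by
  have main : ∀ (s pre : List (List String)) (acc : List (List String)), l = pre ++ s →
      (PySem.List.pyRange (pre.length : Int) (l.length : Int) 1).foldl (fun choques i =>
        (PySem.List.pyRange (i + 1) (l.length : Int) 1).foldl (fun choques j =>
          let di := PySem.List.pyGetD l i []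
          let dj := PySem.List.pyGetD l j []
          if PySem.List.pyGetD di ((di.length : Int) - 1) "" == PySem.List.pyGetD dj ((dj.length : Int) - 1) "" then
            let c1 := if achar_na_lista choques di then choques else choques ++ [di]
            if achar_na_lista c1 dj then c1 else c1 ++ [dj]
          else choques) choques) acc = goA acc s := by
    intro s
    induction s with
    | nil =>
      intro pre acc h
      rw [h, List.append_nil, PySem.List.pyRange_one_eq_nil (le_refl _), List.foldl_nil]
      rfl
    | cons d s' ih =>
      intro pre acc h
      have hlt : (pre.length : Int) < (l.length : Int) := by
        rw [h]
        simp
      rw [PySem.List.pyRange_one_cons hlt, List.foldl_cons]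
      have hdi : PySem.List.pyGetD l ((pre.length : Nat) : Int) [] = d := by
        rw [PySem.List.pyGetD_natCast, h]
        simp [List.getD_eq_getElem?_getD]
      have hdrop : l.drop (((pre.length : Int) + 1).toNat) = s' := by
        rw [h, show pre ++ d :: s' = (pre ++ [d]) ++ s' by simp,
            show ((pre.length : Int) + 1).toNat = (pre ++ [d]).length by simp]
        exact List.drop_left
      have hinner :
          (PySem.List.pyRange ((pre.length : Int) + 1) (l.length : Int) 1).foldl (fun choques j =>
            let di := PySem.List.pyGetD l ((pre.length : Nat) : Int) []
            let dj := PySem.List.pyGetD l j []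
            if PySem.List.pyGetD di ((di.length : Int) - 1) "" == PySem.List.pyGetD dj ((dj.length : Int) - 1) "" then
              let c1 := if achar_na_lista choques di then choques else choques ++ [di]
              if achar_na_lista c1 dj then c1 else c1 ++ [dj]
            else choques) acc = innerL acc d s' := by
        calc _ = (PySem.List.pyRange ((pre.length : Int) + 1) (l.length : Int) 1).foldl
              (fun ch j => (fun ch (e : List String) =>
                if keyf d == keyf e then
                  let c1 := if achar_na_lista ch d then ch else ch ++ [d]
                  if achar_na_lista c1 e then c1 else c1 ++ [e]
                else ch) ch (PySem.List.pyGetD l j [])) acc := by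
              apply PySem.List.foldl_congr_mem
              intro ch j _
              simp only [hdi, keyf_eq_last]
          _ = (l.drop (((pre.length : Int) + 1).toNat)).foldl (fun ch (e : List String) =>
                if keyf d == keyf e then
                  let c1 := if achar_na_lista ch d then ch else ch ++ [d]
                  if achar_na_lista c1 e then c1 else c1 ++ [e]
                else ch) acc := by
              exact PySem.List.foldl_pyRange_pyGetD' l []
                (fun ch (e : List String) =>
                  if keyf d == keyf e then
                    let c1 := if achar_na_lista ch d then ch else ch ++ [d]
                    if achar_na_lista c1 e then c1 else c1 ++ [e]
                  else ch) acc (a := (pre.length : Int) + 1) (by omega)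
          _ = innerL acc d s' := by rw [hdrop]; rfl
      have hrec := ih (pre ++ [d]) (innerL acc d s') (by rw [h]; simp)
      simp only [List.length_append, List.length_cons, List.length_nil] at hrec
      simp only [hinner]
      rw [show ((pre.length : Int) + 1) = (((pre.length + 1 : Nat)) : Int) by push_cast; ring]
      rw [show (pre.length + 1 : Nat) = pre.length + (0 + 1) from by omega] at hrec ⊢
      exact hrec
  have h0 := main l [] [] rfl
  simpa [get_choque_horario] using h0

-- B's groups dict: lookups and keys
theorem getD_groups (l : List (List String)) (c : String) :
    (l.foldl (fun g d => g.modify (keyf d) [] (· ++ [d])) PySem.Dict.empty).getD c [] = grp l c := by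
  have h1 : l.foldl (fun g d => g.modify (keyf d) [] (· ++ [d])) PySem.Dict.empty
      = (l.map (fun d => (keyf d, d))).foldl (fun g p => g.modify p.1 [] (· ++ [p.2])) PySem.Dict.empty := by
    rw [List.foldl_map]
  rw [h1, PySem.Dict.getD_foldl_modify_append]
  simp [grp, List.filter_map, Function.comp_def]

theorem keys_groups (l : List (List String)) :
    (l.foldl (fun g d => g.modify (keyf d) [] (· ++ [d])) PySem.Dict.empty).keys
      = PySem.List.dedup (l.map keyf) := by
  rw [PySem.Dict.keys_foldl_modify_key]
  simp [PySem.Set.update_nil_left]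

-- B's port equals the canonical form
theorem B_eq_F (l : List (List String)) : get_choque_horario_alt l = F l l := by
  unfold get_choque_horario_alt
  by_cases hlen : l.length < 2
  · rw [if_pos hlen]
    match l, hlen with
    | [], _ => rfl
    | [x], _ => simp [F, grp, accAdd, PySem.List.dedup]
  · rw [if_neg hlen]
    have hnodup : (l.foldl (fun g d => g.modify (keyf d) [] (· ++ [d])) PySem.Dict.empty).keys.Nodup := by
      exact PySem.Dict.nodup_keys_foldl_modify_key l keyf [] (fun g d x => x ++ [d]) PySem.Dict.empty (by simp)
    have hvals : (l.foldl (fun g d => g.modify (keyf d) [] (· ++ [d])) PySem.Dict.empty).values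
        = (PySem.List.dedup (l.map keyf)).map (fun k => grp l k) := by
      rw [PySem.Dict.values_eq_map_keys _ hnodup [], keys_groups]
      exact List.map_congr_left (fun k _ => getD_groups l k)
    show ((l.foldl (fun g d => g.modify (keyf d) [] (· ++ [d])) PySem.Dict.empty).values).foldl _ [] = _
    rw [hvals, List.foldl_map]
    calc (PySem.List.dedup (l.map keyf)).foldl
          (fun choques k => if 2 ≤ (grp l k).length then
              choques ++ (grp l k).foldl (fun seen d => if seen.contains d then seen else seen ++ [d]) []
            else choques) []
        = (PySem.List.dedup (l.map keyf)).foldl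
          (fun choques k => choques ++ (if 2 ≤ (grp l k).length then accAdd [] (grp l k) else [])) [] := by
          apply PySem.List.foldl_congr_mem
          intro acc k _
          split <;> simp [accAdd]
      _ = F l l := by
          rw [PySem.List.foldl_append_eq_flatMap]
          simp [F]

-- ===== VERDICT (by name: the statement is the Claim_ definition above) =====
theorem get_choque_horario_spec : Claim_equal_get_choque_horario := by
  intro l _ _
  unfold Spec_get_choque_horario
  rw [B_eq_F, A_eq_goA]
  have h := goA_invariant l l [] rfl
  simpa [F] using h
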